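-- pv_equiv track=rewrite | github.com/rishavroy1264bitmesra/sample_code | validators/subheading_validator.py | check_if_has_specialchar
-- ===== SOURCE A (Python) =====
-- SPECIAL_CHARS = ['.', ':']
--
-- def check_if_has_specialchar(text):
--     break_point = 0
--     for index, character in enumerate(text):
--         if index > 70:
--             break
--         else:
--             if (character in SPECIAL_CHARS) and index > 4:
--                 break_point = index
--     if len(text) > break_point and break_point > 5:
--         return break_point
--     else:
--         return -1
-- ===== SOURCE B (Python) =====
-- SPECIAL_CHARS = ['.', ':']
--
-- def check_if_has_specialchar(text):
--     # scan backwards from the capped end; first hit is the last special index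
--     for i in range(min(len(text) - 1, 70), 5, -1):
--         if text[i] in SPECIAL_CHARS:
--             return i
--     return -1
-- ===== Notes on version B (the rewrite author's own statement) =====
-- stated objective: alternative
-- what changed: B scans backwards from min(len(text)-1,70) and returns the first (i.e. maximal) special-char index > 5 immediately, instead of A's forward full scan that keeps the last match and applies the final guard.
import Mathlib
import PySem

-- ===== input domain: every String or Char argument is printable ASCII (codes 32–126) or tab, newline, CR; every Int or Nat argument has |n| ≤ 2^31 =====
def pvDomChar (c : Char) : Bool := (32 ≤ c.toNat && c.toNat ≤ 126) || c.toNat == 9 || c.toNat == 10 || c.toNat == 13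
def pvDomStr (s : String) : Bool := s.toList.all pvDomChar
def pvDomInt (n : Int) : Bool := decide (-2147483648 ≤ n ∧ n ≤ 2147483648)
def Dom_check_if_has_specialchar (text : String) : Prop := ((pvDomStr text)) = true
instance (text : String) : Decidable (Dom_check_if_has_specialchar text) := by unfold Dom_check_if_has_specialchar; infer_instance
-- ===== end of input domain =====

-- B replaces A's forward scan (keep last match, then guard) by a backward scan from
-- min(len-1,70) that returns the first special index > 5 it meets; return value only.

def SPECIAL_CHARS : List Char := ['.', ':']

-- ===== PORT A =====
-- the 'for index, character in enumerate(text)' loop, with the 'index > 70: break'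
def aLoop (l : List Char) (i : Nat) (bp : Int) : Int :=
  match l with
  | [] => bp
  | c :: rest =>
    if i > 70 then bp
    else aLoop rest (i + 1) (if c ∈ SPECIAL_CHARS ∧ i > 4 then (i : Int) else bp)

def check_if_has_specialchar (text : String) : Int :=
  let bp := aLoop text.toList 0 0
  if (text.toList.length : Int) > bp ∧ bp > 5 then bp else -1

-- ===== PORT B =====
-- 'for i in range(min(len(text)-1,70), 5, -1)' as a downward recursion; the index is
-- always in range there, so the .getD ' ' default is never used.
def bGo (cs : List Char) (i : Int) : Int :=
  if i ≤ 5 then -1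
  else if (PySem.List.pyGet? cs i).getD ' ' ∈ SPECIAL_CHARS then i
  else bGo cs (i - 1)
termination_by (i - 5).toNat
decreasing_by omega

def check_if_has_specialchar_alt (text : String) : Int :=
  bGo text.toList (min ((text.toList.length : Int) - 1) 70)

-- ===== PRECONDITION & SPEC =====
def Spec_check_if_has_specialchar (text : String) (out : Int) : Prop := out = check_if_has_specialchar_alt text
instance (text : String) (out : Int) : Decidable (Spec_check_if_has_specialchar text out) := by unfold Spec_check_if_has_specialchar; infer_instance

-- ===== CLAIM (what is proved, stated in full; the proofs are below) =====
def Claim_equal_check_if_has_specialchar : Prop := ∀ (text : String), Dom_check_if_has_specialchar text → Spec_check_if_has_specialchar text (check_if_has_specialchar text)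

-- ===== LEMMAS AND PROOFS =====

theorem bGo_le_five (cs : List Char) (i : Int) (h : i ≤ 5) : bGo cs i = -1 := by
  unfold bGo; simp [h]

-- loop invariant: the normalised accumulator equals B's backward scan over the
-- already-visited prefix, and the accumulator is 0 or a real index ≥ 5
theorem aLoop_inv (cs : List Char) : ∀ (l : List Char) (i : Nat) (bp : Int),
    l = cs.drop i → i ≤ cs.length →
    (bp = 0 ∨ (5 ≤ bp ∧ bp < cs.length)) →
    (if bp > 5 then bp else -1) = bGo cs (min ((i : Int) - 1) 70) →
    (aLoop l i bp = 0 ∨ (5 ≤ aLoop l i bp ∧ aLoop l i bp < cs.length)) ∧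
      (if aLoop l i bp > 5 then aLoop l i bp else -1)
        = bGo cs (min ((cs.length : Int) - 1) 70) := by
  intro l
  induction l with
  | nil =>
    intro i bp hdrop hle hbp hnorm
    have : i = cs.length := le_antisymm hle (by
      by_contra h
      have := List.drop_eq_nil_iff.mp hdrop.symm
      omega)
    subst this
    simpa [aLoop] using ⟨hbp, hnorm⟩
  | cons c rest ih =>
    intro i bp hdrop hle hbp hnorm
    have hlen : i < cs.length := by
      by_contra h
      have : cs.drop i = [] := List.drop_eq_nil_iff.mpr (by omega)
      rw [this] at hdrop; simp at hdrop
    by_cases hbreak : i > 70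
    · -- break: both sides are bGo cs 70
      have h70 : min ((i : Int) - 1) 70 = 70 := by omega
      have h70' : min ((cs.length : Int) - 1) 70 = 70 := by omega
      simp only [aLoop, if_pos hbreak]
      rw [h70] at hnorm
      exact ⟨hbp, by rw [h70']; exact hnorm⟩
    · simp only [aLoop, if_neg hbreak]
      have hrest : rest = cs.drop (i + 1) := by
        have := congrArg (List.drop 1) hdrop
        simpa [List.drop_drop, Nat.add_comm] using this
      have hget : PySem.List.pyGet? cs (i : Int) = some c := by
        have h0 : cs[i]? = some c := by
          simpa [← hdrop] using (List.getElem?_drop : (cs.drop i)[0]? = cs[i + 0]?).symm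
        simpa [PySem.List.pyGet?_natCast] using h0
      apply ih (i + 1) _ hrest (by omega)
      · by_cases hc : c ∈ SPECIAL_CHARS ∧ i > 4
        · rw [if_pos hc]; right; constructor <;> [exact_mod_cast hc.2; exact_mod_cast hlen]
        · rw [if_neg hc]; exact hbp
      · have hpush : min (((i + 1 : Nat) : Int) - 1) 70 = (i : Int) := by push_cast; omega
        rw [hpush]
        by_cases hc : c ∈ SPECIAL_CHARS ∧ i > 4
        · rw [if_pos hc]
          by_cases h5 : (i : Int) > 5
          · rw [if_pos h5]
            rw [bGo, if_neg (by omega), hget]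
            simp [hc.1]
          · -- i = 5: bGo cs 5 = -1
            rw [if_neg h5, bGo_le_five cs _ (by omega)]
        · rw [if_neg hc]
          by_cases h5 : (i : Int) ≤ 5
          · rw [bGo_le_five cs _ h5, hnorm, bGo_le_five cs _ (by omega)]
          · rw [bGo, if_neg h5, hget]
            have hcnot : c ∉ SPECIAL_CHARS := by
              intro hmem; exact hc ⟨hmem, by omega⟩
            simp only [Option.getD_some, hcnot]
            rw [hnorm]
            congr 1
            omega

theorem check_if_has_specialchar_spec : Claim_equal_check_if_has_specialchar := by
  intro text _
  unfold Spec_check_if_has_specialchar check_if_has_specialchar check_if_has_specialchar_alt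
  set cs := text.toList with hcs
  have h := aLoop_inv cs cs 0 0 (by simp) (by omega) (Or.inl rfl)
    (by rw [bGo_le_five cs _ (by omega)]; norm_num)
  set r := aLoop cs 0 0 with hr
  rcases h with ⟨hrange, hnorm⟩
  by_cases h5 : r > 5
  · have hlt : r < cs.length := by rcases hrange with h | h; omega; exact h.2
    rw [if_pos ⟨hlt, h5⟩, ← hnorm, if_pos h5]
  · rw [if_neg (by intro h; exact h5 h.2), ← hnorm, if_neg h5]
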